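-- pv_equiv track=rewrite | github.com/kdk0411/Coding_Test_Study | Programmers/Lv.01/과일 장수.py | solution
-- ===== SOURCE A (Python) =====
-- def solution(k, m, score):
--     score.sort(reverse=True)
--     ret = 0
--     for i in range(0, len(score), m):
--         arr = score[i:i+m]
--         if len(arr) == m:
--             ret += min(arr) * m
--     return ret
-- ===== SOURCE B (Python) =====
-- def solution(k, m, score):
--     score.sort(reverse=True)
--     # Walk the sorted list run by run (maximal blocks of equal scores).
--     # Box j (0-based) is full iff (j+1)*m <= n, and its minimum is the
--     # element at position (j+1)*m in 1-based order; the number of such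
--     # box-minimum positions falling inside a run [i, j) is j//m - i//m,
--     # so each run contributes (j//m - i//m) * score_value * m.
--     n = len(score)
--     ret = 0
--     i = 0
--     while i < n:
--         g = score[i]
--         j = i
--         while j < n and score[j] == g:
--             j += 1
--         ret += (j // m - i // m) * g * m
--         i = j
--     return ret
-- ===== Notes on version B (the rewrite author's own statement) =====
-- stated objective: alternative
-- what changed: Instead of iterating box by box and scanning each m-slice with min(), B walks the descending-sorted list once run-by-run (maximal blocks of equal scores) and counts, by floor-division arithmetic, how many full-box minimum positions fall inside each run, adding count*value*m per run.
-- outside the precondition, e.g. on solution(3, -2, [3, 2, 1]): A returns 0, B returns 8; on solution(3, 0, [1, 2, 3]): A raises ValueError, B raises ZeroDivisionError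
import Mathlib
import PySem

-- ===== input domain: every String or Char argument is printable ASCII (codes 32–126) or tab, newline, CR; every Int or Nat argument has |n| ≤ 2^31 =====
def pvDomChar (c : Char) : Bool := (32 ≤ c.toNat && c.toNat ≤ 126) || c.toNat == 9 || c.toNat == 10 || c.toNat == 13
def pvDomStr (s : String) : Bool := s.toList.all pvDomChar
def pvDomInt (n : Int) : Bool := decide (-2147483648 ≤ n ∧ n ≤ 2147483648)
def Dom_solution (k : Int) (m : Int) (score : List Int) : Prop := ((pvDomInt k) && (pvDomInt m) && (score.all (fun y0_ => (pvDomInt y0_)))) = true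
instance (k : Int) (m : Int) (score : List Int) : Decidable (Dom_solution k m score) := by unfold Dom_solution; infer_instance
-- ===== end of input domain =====

-- B replaces A's box-by-box slice-and-min() loop by a single run-by-run walk of the
-- descending-sorted list, counting full-box minimum positions per run of equal scores
-- by floor division (alternative decomposition). Both A and B sort `score` in place;
-- the equivalence proved here is about the return value only (same mutation in both).

-- ===== PORT A =====
def solution (k : Int) (m : Int) (score : List Int) : Int :=
  let s := PySem.List.sorted score (fun x => x) true
  (PySem.List.pyRange 0 (s.length : Int) m).foldl
    (fun ret i =>
      let arr := PySem.List.slice s (some i) (some (i + m))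
      if (arr.length : Int) = m then
        -- min(arr): arr is nonempty whenever this branch fires (its length equals m ≠ 0);
        -- the .getD 0 default is never used.
        ret + (PySem.List.min? arr (fun x => x)).getD 0 * m
      else ret) 0

-- ===== PORT B =====
-- inner loop `while j < n and score[j] == g: j += 1` (score[j] is in range whenever read,
-- so List.getD is exact there)
def pvAdvRun (s : List Int) (g : Int) (j : Nat) : Nat :=
  if j < s.length then
    if s.getD j 0 = g then pvAdvRun s g (j + 1) else j
  else j
termination_by s.length - j

-- inner-loop facts, needed for the outer loop's termination
theorem pvAdvRun_ge (s : List Int) (g : Int) (j : Nat) : j ≤ pvAdvRun s g j := by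
  fun_induction pvAdvRun s g j with
  | case1 j h1 h2 ih => omega
  | case2 j h1 h2 => exact Nat.le_refl _
  | case3 j h1 => exact Nat.le_refl _

theorem pvAdvRun_gt (s : List Int) (i : Nat) (h : i < s.length) :
    i < pvAdvRun s (s.getD i 0) i := by
  rw [pvAdvRun, if_pos h, if_pos rfl]
  have := pvAdvRun_ge s (s.getD i 0) (i + 1)
  omega

-- outer loop `while i < n: … ; i = j`
def pvRunLoop (m : Int) (s : List Int) (i : Nat) (ret : Int) : Int :=
  if h : i < s.length then
    let g := s.getD i 0
    let j := pvAdvRun s g i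
    pvRunLoop m s j (ret + (PySem.Int.floordiv (j : Int) m - PySem.Int.floordiv (i : Int) m) * g * m)
  else ret
termination_by s.length - i
decreasing_by
  have := pvAdvRun_gt s i h
  omega

def solution_alt (k : Int) (m : Int) (score : List Int) : Int :=
  let s := PySem.List.sorted score (fun x => x) true
  pvRunLoop m s 0 0

-- ===== PRECONDITION & SPEC =====
-- Pre_ restricts to the task's natural domain m ≥ 1 (box size): at m = 0 A raises
-- ValueError (zero range step) and B raises ZeroDivisionError; for negative m
-- (a meaningless box size) A's 0 is an accident of range's empty iteration that
-- B's floor-division arithmetic does not reproduce.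
def Pre_solution (k : Int) (m : Int) (score : List Int) : Prop := 0 < m
instance (k : Int) (m : Int) (score : List Int) : Decidable (Pre_solution k m score) := by unfold Pre_solution; infer_instance
def pvWitness_solution : Int × Int × List Int := (4, 3, [4, 1, 2, 4, 2, 3, 1])

def Spec_solution (k : Int) (m : Int) (score : List Int) (out : Int) : Prop := out = solution_alt k m score
instance (k : Int) (m : Int) (score : List Int) (out : Int) : Decidable (Spec_solution k m score out) := by unfold Spec_solution; infer_instance

-- ===== CLAIM (what is proved, stated in full; the proofs are below) =====
def Claim_equal_solution : Prop := ∀ (k : Int) (m : Int) (score : List Int), Dom_solution k m score → Pre_solution k m score → Spec_solution k m score (solution k m score)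

-- ===== LEMMAS AND PROOFS =====

-- min() of a nonempty weakly descending list is its last element
theorem pv_min?_desc (t : List Int) (h : List.Pairwise (fun a b => b ≤ a) t) (hne : t ≠ []) :
    PySem.List.min? t (fun x => x) = some (t.getLast hne) := by
  cases hmv : PySem.List.min? t (fun x => x) with
  | none => exact absurd ((PySem.List.min?_eq_none_iff t _).1 hmv) hne
  | some mv =>
    have hmem := PySem.List.min?_mem hmv
    have hmin := PySem.List.min?_isMin hmv
    have h1 : mv ≤ t.getLast hne := hmin _ (List.getLast_mem hne)
    have h2 : t.getLast hne ≤ mv := by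
      obtain ⟨i, hi, rfl⟩ := List.getElem_of_mem hmem
      rw [List.getLast_eq_getElem]
      rcases Nat.lt_or_ge i (t.length - 1) with hlt | hge
      · exact (List.pairwise_iff_getElem.1 h) i (t.length - 1) hi (by omega) hlt
      · have hieq : i = t.length - 1 := by omega
        simp [hieq]
    exact congrArg some (le_antisymm h1 h2)

-- A's box loop equals the indexed sum of box minima, over any weakly descending list s
theorem pv_main (M : Nat) (hM : 0 < M) (s : List Int)
    (hs : List.Pairwise (fun a b => b ≤ a) s) :
    (PySem.List.pyRange 0 (s.length : Int) (M : Int)).foldl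
      (fun ret i =>
        if (((PySem.List.slice s (some i) (some (i + (M : Int)))).length : Int) = (M : Int)) then
          ret + (PySem.List.min? (PySem.List.slice s (some i) (some (i + (M : Int)))) (fun x => x)).getD 0 * (M : Int)
        else ret) 0
    = ((PySem.List.pyRange 0 (PySem.Int.floordiv (s.length : Int) (M : Int)) 1).map
        (fun j => PySem.List.pyGetD s ((j + 1) * (M : Int) - 1) 0 * (M : Int))).sum := by
  have hMI : (0 : Int) < (M : Int) := by exact_mod_cast hM
  rw [PySem.List.pyRange_of_pos 0 (s.length : Int) hMI]
  rw [show ((s.length : Int) : Int) = ((s.length : Nat) : Int) from rfl]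
  by_cases hn0 : s.length = 0
  · simp [hn0, PySem.Int.floordiv, Int.zero_fdiv, PySem.List.pyRange]
  · have hn : 0 < s.length := Nat.pos_of_ne_zero hn0
    set n := s.length with hndef
    have hq : (if (0:Int) < (n:Int) then (((n:Int) - 0 + (M:Int) - 1) / (M:Int)).toNat else 0)
        = (n + M - 1) / M := by
      rw [if_pos (by exact_mod_cast hn)]
      rw [show ((n:Int) - 0 + (M:Int) - 1) = (((n + M - 1 : Nat)) : Int) by push_cast [Nat.cast_sub (by omega : 1 ≤ n + M)]; ring]
      rw [show ((n + M - 1 : Nat) : Int) / (M : Int) = (((n + M - 1) / M : Nat) : Int) from (Int.natCast_div _ _).symm]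
      exact Int.toNat_natCast _
    rw [hq]
    rw [show PySem.Int.floordiv (n : Int) (M : Int) = ((n / M : Nat) : Int) from PySem.Int.floordiv_natCast n M]
    rw [PySem.List.pyRange_one]
    simp only [sub_zero, Int.toNat_natCast, List.map_map, List.foldl_map]
    set q := (n + M - 1) / M with hqdef
    set N := n / M with hNdef
    have hslice : ∀ k : Nat, PySem.List.slice s (some (0 + (M:Int) * (k:Int))) (some (0 + (M:Int) * (k:Int) + (M:Int))) = (s.drop (M*k)).take M := by
      intro k
      rw [show (0 + (M:Int) * (k:Int)) = ((M*k : Nat) : Int) by push_cast; ring]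
      exact PySem.List.slice_natCast_add s (M*k) M
    have hlen : ∀ k : Nat, ((s.drop (M*k)).take M).length = min M (n - M*k) := by
      intro k; simp [hndef]
    have hbody : (fun (x : Int) (y : Nat) =>
        if (((PySem.List.slice s (some (0 + (M:Int) * (y:Int))) (some (0 + (M:Int) * (y:Int) + (M:Int)))).length : Int) = (M:Int)) then
          x + (PySem.List.min? (PySem.List.slice s (some (0 + (M:Int) * (y:Int))) (some (0 + (M:Int) * (y:Int) + (M:Int)))) (fun x => x)).getD 0 * (M:Int)
        else x)
        = fun x y => x + (if ((((s.drop (M*y)).take M).length : Int) = (M:Int)) then (PySem.List.min? ((s.drop (M*y)).take M) (fun x => x)).getD 0 * (M:Int) else 0) := by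
      funext x y
      rw [hslice y]
      split_ifs <;> simp
    rw [hbody, PySem.List.foldl_add (List.range q) _ 0, zero_add]
    have hNq : N ≤ q := Nat.div_le_div_right (by omega)
    rw [show q = N + (q - N) by omega, List.range_add, List.map_append, List.sum_append]
    have hcond : ∀ y : Nat, ((((s.drop (M*y)).take M).length : Int) = (M:Int)) ↔ M*y + M ≤ n := by
      intro y
      rw [Nat.cast_inj, hlen y]
      generalize M*y = A
      omega
    have htail : ((List.map (fun x => N + x) (List.range (q - N))).map
        (fun y => if ((((s.drop (M*y)).take M).length : Int) = (M:Int)) then (PySem.List.min? ((s.drop (M*y)).take M) (fun x => x)).getD 0 * (M:Int) else 0)).sum = 0 := by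
      rw [List.map_map]
      apply List.sum_eq_zero
      intro x hx
      simp only [List.mem_map, List.mem_range, Function.comp] at hx
      obtain ⟨j, hj, rfl⟩ := hx
      have hnk : n < (N + j + 1) * M := by
        by_contra hcon
        push Not at hcon
        have : N + j + 1 ≤ N := (Nat.le_div_iff_mul_le hM).2 hcon
        omega
      rw [if_neg]
      rw [hcond (N + j), show M*(N+j) + M = (N + j + 1) * M by ring]
      omega
    rw [htail, add_zero]
    refine congrArg List.sum (List.map_congr_left ?_)
    intro k hk
    rw [List.mem_range] at hk
    have hkM : (k+1)*M ≤ n := (Nat.le_div_iff_mul_le hM).1 (by omega)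
    have hfull : M*k + M ≤ n := by rw [show M*k + M = (k+1)*M by ring]; exact hkM
    have hlenk : ((s.drop (M*k)).take M).length = M := by
      rw [hlen k]
      generalize M*k = A at hfull ⊢
      omega
    rw [if_pos (by exact_mod_cast hlenk)]
    have hne : (s.drop (M*k)).take M ≠ [] := by
      intro hcon
      rw [hcon] at hlenk
      simp at hlenk
      omega
    have hpw : List.Pairwise (fun a b => b ≤ a) ((s.drop (M*k)).take M) :=
      hs.sublist ((List.take_sublist _ _).trans (List.drop_sublist _ _))
    rw [pv_min?_desc _ hpw hne]
    simp only [Option.getD_some, Function.comp]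
    congr 1
    have hidx1 : (0 + (k:Int) + 1) * (M:Int) - 1 = (((k+1)*M - 1 : Nat) : Int) := by
      push_cast [Nat.cast_sub (show 1 ≤ (k+1)*M from Nat.mul_pos (Nat.succ_pos k) hM)]
      ring
    have hbnd : (k+1)*M - 1 < n := by
      have h1 : 1 ≤ (k+1)*M := Nat.mul_pos (Nat.succ_pos k) hM
      generalize (k+1)*M = B at hkM h1
      omega
    rw [hidx1, PySem.List.pyGetD_eq_getElem s 0 (Int.natCast_nonneg _) (by exact_mod_cast hbnd)]
    rw [List.getLast_eq_getElem]
    simp only [hlenk, Int.toNat_natCast, List.getElem_take, List.getElem_drop]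
    have hidx2 : M*k + (M-1) = (k+1)*M - 1 := by
      rw [show (k+1)*M = M*k + M by ring]
      generalize M*k = A
      omega
    simp only [hidx2]

-- pvAdvRun stops within the list
theorem pvAdvRun_le (s : List Int) (g : Int) (j : Nat) (h : j ≤ s.length) :
    pvAdvRun s g j ≤ s.length := by
  fun_induction pvAdvRun s g j with
  | case1 j h1 h2 ih => exact ih (by omega)
  | case2 j h1 h2 => omega
  | case3 j h1 => omega

-- every position strictly before the stop point holds the run's value
theorem pvAdvRun_run (s : List Int) (g : Int) (j : Nat) :
    ∀ t, j ≤ t → t < pvAdvRun s g j → s.getD t 0 = g := by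
  fun_induction pvAdvRun s g j with
  | case1 j h1 h2 ih =>
    intro t ht1 ht2
    rcases Nat.eq_or_lt_of_le ht1 with rfl | hlt
    · exact h2
    · exact ih t hlt ht2
  | case2 j h1 h2 => intro t ht1 ht2; omega
  | case3 j h1 => intro t ht1 ht2; omega

-- B's run loop computes the indexed sum of box minima over the remaining boxes
theorem pvRunLoop_eq (M : Nat) (hM : 0 < M) (s : List Int) :
    ∀ fuel i ret, s.length - i ≤ fuel → i ≤ s.length →
      pvRunLoop (M : Int) s i ret
        = ret + ((List.range' (i / M) (s.length / M - i / M)).map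
            (fun j => s.getD ((j + 1) * M - 1) 0 * (M : Int))).sum := by
  intro fuel
  induction fuel with
  | zero =>
    intro i ret hf hi
    have hieq : i = s.length := by omega
    rw [pvRunLoop, dif_neg (by omega)]
    simp [hieq]
  | succ f ih =>
    intro i ret hf hi
    by_cases h : i < s.length
    · rw [pvRunLoop, dif_pos h]
      set g := s.getD i 0 with hg
      set j := pvAdvRun s g i with hj
      have hij : i < j := pvAdvRun_gt s i h
      have hjn : j ≤ s.length := pvAdvRun_le s g i (by omega)
      have hrun : ∀ t, i ≤ t → t < j → s.getD t 0 = g := pvAdvRun_run s g i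
      rw [ih j _ (by omega) hjn]
      have hdiv1 : i / M ≤ j / M := Nat.div_le_div_right (by omega)
      have hdiv2 : j / M ≤ s.length / M := Nat.div_le_div_right hjn
      -- split the index range at j / M
      have hsplit : List.range' (i / M) (s.length / M - i / M)
          = List.range' (i / M) (j / M - i / M) ++ List.range' (i / M + (j / M - i / M)) (s.length / M - j / M) := by
        rw [List.range'_append_1]
        congr 1
        omega
      have hstart : i / M + (j / M - i / M) = j / M := by omega
      rw [hsplit, hstart, List.map_append, List.sum_append]
      -- the first block is constant: each box minimum position lies in the run [i, j)
      have hconst : ((List.range' (i / M) (j / M - i / M)).map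
          (fun jj => s.getD ((jj + 1) * M - 1) 0 * (M : Int)))
          = (List.range' (i / M) (j / M - i / M)).map (fun _ => g * (M : Int)) := by
        apply List.map_congr_left
        intro jj hjj
        rw [List.mem_range'_1] at hjj
        have hlo : i ≤ (jj + 1) * M - 1 := by
          have h1 : i < (i / M + 1) * M := by
            have h2 := Nat.div_add_mod i M
            have h3 := Nat.mod_lt i hM
            calc i = M * (i / M) + i % M := by omega
              _ < M * (i / M) + M := by omega
              _ = (i / M + 1) * M := by ring
          have h4 : (i / M + 1) * M ≤ (jj + 1) * M := Nat.mul_le_mul_right M (by omega)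
          have h6 : i < (jj + 1) * M := Nat.lt_of_lt_of_le h1 h4
          omega
        have hhi : (jj + 1) * M - 1 < j := by
          have h5 : (jj + 1) * M ≤ j := (Nat.le_div_iff_mul_le hM).1 (by omega)
          have hpos : 1 ≤ (jj + 1) * M := Nat.mul_pos (Nat.succ_pos jj) hM
          omega
        rw [hrun _ hlo hhi]
      rw [hconst]
      have hsum : ((List.range' (i / M) (j / M - i / M)).map (fun _ => g * (M : Int))).sum
          = ((j / M - i / M : Nat) : Int) * (g * (M : Int)) := by
        simp [List.map_const']
      rw [hsum]
      have hstep : (PySem.Int.floordiv (j : Int) (M : Int) - PySem.Int.floordiv (i : Int) (M : Int)) * g * (M : Int)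
          = ((j / M - i / M : Nat) : Int) * (g * (M : Int)) := by
        rw [PySem.Int.floordiv_natCast, PySem.Int.floordiv_natCast,
          Int.natCast_sub hdiv1]
        ring
      rw [hstep]
      ring
    · rw [pvRunLoop, dif_neg h]
      have hieq : i = s.length := by omega
      simp [hieq]

-- ===== VERDICT (by name: the statement is the Claim_ definition above) =====
theorem solution_spec : Claim_equal_solution := by
  intro k m score _hdom hpre
  have hpre' : (0 : Int) < m := hpre
  unfold Spec_solution solution solution_alt
  set s := PySem.List.sorted score (fun x => x) true with hsdef
  have hs : List.Pairwise (fun a b => b ≤ a) s := PySem.List.sorted_pairwise_rev score _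
  obtain ⟨M, rfl⟩ := Int.eq_ofNat_of_zero_le hpre'.le
  have hM : 0 < M := by exact_mod_cast hpre'
  rw [pv_main M hM s hs]
  rw [pvRunLoop_eq M hM s (s.length) 0 0 (by omega) (by omega)]
  rw [show PySem.Int.floordiv ((s.length : Nat) : Int) ((M : Nat) : Int) = ((s.length / M : Nat) : Int) from PySem.Int.floordiv_natCast _ _]
  rw [PySem.List.pyRange_one]
  simp only [Nat.zero_div, Nat.sub_zero, sub_zero, Int.toNat_natCast, List.map_map, zero_add]
  rw [← List.range_eq_range']
  refine congrArg List.sum (List.map_congr_left ?_)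
  intro t ht
  rw [List.mem_range] at ht
  have hM' : 1 ≤ (t + 1) * M := Nat.mul_pos (Nat.succ_pos t) hM
  have hidx : ((t : Int) + 1) * (M : Int) - 1 = (((t + 1) * M - 1 : Nat) : Int) := by
    push_cast [Nat.cast_sub hM']
    ring
  simp only [Function.comp, hidx, PySem.List.pyGetD_natCast]
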